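-- pv_equiv track=rewrite | github.com/preston192/leetcode_submissions | 3952-TrionicArrayI/3952-TrionicArrayI.py | isTrionic
-- ===== SOURCE A (Python) =====
-- from typing import List
--
-- def isTrionic(nums: List[int]) -> bool:
--     n = len(nums)
--     if nums[0] >= nums[1]:
--         return False
--
--     count = 1
--     for i in range(2, n):
--         if nums[i - 1] == nums[i]:
--             return False
--         if (nums[i - 2] - nums[i - 1]) * (nums[i - 1] - nums[i]) < 0:
--             count += 1
--
--     return count == 3
-- ===== SOURCE B (Python) =====
-- from typing import List
--
-- def isTrionic(nums: List[int]) -> bool: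
--     n = len(nums)
--     if nums[0] >= nums[1]:
--         return False
--     i = 1
--     while i < n and nums[i - 1] < nums[i]:
--         i += 1
--     p1 = i
--     while i < n and nums[i - 1] > nums[i]:
--         i += 1
--     p2 = i
--     while i < n and nums[i - 1] < nums[i]:
--         i += 1
--     return p1 < p2 and p2 < i and i == n
-- ===== Notes on version B (the rewrite author's own statement) =====
-- stated objective: alternative
-- what changed: Replaces A's sign-change counter (product of consecutive differences, count==3) with a three-phase pointer walk: three explicit while-loops consume the increasing, decreasing and increasing runs, and the result checks that the last two runs are non-empty and the pointer reached the end.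
import Mathlib
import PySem

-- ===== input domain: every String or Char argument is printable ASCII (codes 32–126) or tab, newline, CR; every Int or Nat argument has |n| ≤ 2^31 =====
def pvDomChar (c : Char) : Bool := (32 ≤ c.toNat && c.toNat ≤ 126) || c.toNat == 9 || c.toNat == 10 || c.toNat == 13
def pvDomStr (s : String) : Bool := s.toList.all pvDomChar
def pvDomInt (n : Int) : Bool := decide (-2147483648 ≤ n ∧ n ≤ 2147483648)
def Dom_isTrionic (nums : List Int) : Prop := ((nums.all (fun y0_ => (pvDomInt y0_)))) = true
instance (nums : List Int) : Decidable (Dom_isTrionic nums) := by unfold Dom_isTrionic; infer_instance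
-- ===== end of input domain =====

-- B replaces A's sign-change counter with three explicit phase scans (alternative decomposition).

-- ===== PORT A =====
-- the for-loop of A: i runs from 2 to n-1, early return False on an equal pair,
-- count incremented when the product of consecutive differences is negative
def aGo (nums : List Int) (i : Nat) (count : Int) : Bool :=
  if i < nums.length then
    if nums.getD (i - 1) 0 = nums.getD i 0 then false
    else aGo nums (i + 1)
      (if (nums.getD (i - 2) 0 - nums.getD (i - 1) 0) * (nums.getD (i - 1) 0 - nums.getD i 0) < 0
       then count + 1 else count)
  else decide (count = 3)
termination_by nums.length - i
decreasing_by omega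

def isTrionic (nums : List Int) : Bool :=
  if nums.getD 0 0 ≥ nums.getD 1 0 then false
  else aGo nums 2 1

-- ===== PORT B =====
-- while i < n and nums[i-1] < nums[i]: i += 1
def upRun (nums : List Int) (i : Nat) : Nat :=
  if h : i < nums.length ∧ nums.getD (i - 1) 0 < nums.getD i 0 then upRun nums (i + 1) else i
termination_by nums.length - i
decreasing_by omega

-- while i < n and nums[i-1] > nums[i]: i += 1
def downRun (nums : List Int) (i : Nat) : Nat :=
  if h : i < nums.length ∧ nums.getD (i - 1) 0 > nums.getD i 0 then downRun nums (i + 1) else i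
termination_by nums.length - i
decreasing_by omega

def isTrionic_alt (nums : List Int) : Bool :=
  if nums.getD 0 0 ≥ nums.getD 1 0 then false
  else
    let p1 := upRun nums 1
    let p2 := downRun nums p1
    let p3 := upRun nums p2
    decide (p1 < p2 ∧ p2 < p3 ∧ p3 = nums.length)

-- ===== PRECONDITION & SPEC =====
-- Pre_ excludes only lists of length < 2, on which A raises IndexError at nums[0]/nums[1].
def Pre_isTrionic (nums : List Int) : Prop := 2 ≤ nums.length
instance (nums : List Int) : Decidable (Pre_isTrionic nums) := by unfold Pre_isTrionic; infer_instance
def pvWitness_isTrionic : List Int := [1, 3, 2, 5]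

def Spec_isTrionic (nums : List Int) (out : Bool) : Prop := out = isTrionic_alt nums
instance (nums : List Int) (out : Bool) : Decidable (Spec_isTrionic nums out) := by unfold Spec_isTrionic; infer_instance

-- ===== CLAIM (what is proved, stated in full; the proofs are below) =====
def Claim_equal_isTrionic : Prop := ∀ (nums : List Int), Dom_isTrionic nums → Pre_isTrionic nums → Spec_isTrionic nums (isTrionic nums)

-- ===== LEMMAS AND PROOFS =====

theorem upRun_stop (nums : List Int) (i : Nat)
    (h : ¬(i < nums.length ∧ nums.getD (i - 1) 0 < nums.getD i 0)) : upRun nums i = i := by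
  rw [upRun, dif_neg h]

theorem upRun_step (nums : List Int) (i : Nat)
    (h : i < nums.length ∧ nums.getD (i - 1) 0 < nums.getD i 0) :
    upRun nums i = upRun nums (i + 1) := by
  rw [upRun, dif_pos h]

theorem downRun_stop (nums : List Int) (i : Nat)
    (h : ¬(i < nums.length ∧ nums.getD (i - 1) 0 > nums.getD i 0)) : downRun nums i = i := by
  rw [downRun, dif_neg h]

theorem downRun_step (nums : List Int) (i : Nat)
    (h : i < nums.length ∧ nums.getD (i - 1) 0 > nums.getD i 0) :
    downRun nums i = downRun nums (i + 1) := by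
  rw [downRun, dif_pos h]

theorem upRun_ge_aux (nums : List Int) (k : Nat) :
    ∀ i, nums.length - i = k → i ≤ upRun nums i := by
  induction k with
  | zero => intro i hk; rw [upRun_stop nums i (by intro hc; omega)]
  | succ k ih =>
      intro i hk
      by_cases h : i < nums.length ∧ nums.getD (i - 1) 0 < nums.getD i 0
      · rw [upRun_step nums i h]
        have := ih (i + 1) (by omega)
        omega
      · rw [upRun_stop nums i h]

theorem upRun_ge (nums : List Int) (i : Nat) : i ≤ upRun nums i :=
  upRun_ge_aux nums (nums.length - i) i rfl

theorem downRun_ge_aux (nums : List Int) (k : Nat) :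
    ∀ i, nums.length - i = k → i ≤ downRun nums i := by
  induction k with
  | zero => intro i hk; rw [downRun_stop nums i (by intro hc; omega)]
  | succ k ih =>
      intro i hk
      by_cases h : i < nums.length ∧ nums.getD (i - 1) 0 > nums.getD i 0
      · rw [downRun_step nums i h]
        have := ih (i + 1) (by omega)
        omega
      · rw [downRun_stop nums i h]

theorem downRun_ge (nums : List Int) (i : Nat) : i ≤ downRun nums i :=
  downRun_ge_aux nums (nums.length - i) i rfl

-- once count ≥ 4 the loop of A can only return false
theorem aGo_ge4 (nums : List Int) (k : Nat) :
    ∀ i c, nums.length - i = k → 4 ≤ c → aGo nums i c = false := by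
  induction k with
  | zero =>
      intro i c hk hc
      rw [aGo, if_neg (by omega)]
      simp; omega
  | succ k ih =>
      intro i c hk hc
      rw [aGo]
      by_cases hi : i < nums.length
      · rw [if_pos hi]
        by_cases heq : nums.getD (i - 1) 0 = nums.getD i 0
        · rw [if_pos heq]
        · rw [if_neg heq]
          split
          · exact ih (i + 1) (c + 1) (by omega) (by omega)
          · exact ih (i + 1) c (by omega) hc
      · rw [if_neg hi]; simp; omega

-- phase 3: count = 3, currently increasing
theorem aGo_phase3 (nums : List Int) (k : Nat) :
    ∀ i, nums.length - i = k → 2 ≤ i → i ≤ nums.length →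
    nums.getD (i - 2) 0 < nums.getD (i - 1) 0 →
    aGo nums i 3 = decide (upRun nums i = nums.length) := by
  induction k with
  | zero =>
      intro i hk h2 hin hup
      rw [aGo, if_neg (by omega), upRun_stop nums i (by intro hc; omega)]
      simp; omega
  | succ k ih =>
      intro i hk h2 hin hup
      have hi : i < nums.length := by omega
      rw [aGo, if_pos hi]
      by_cases heq : nums.getD (i - 1) 0 = nums.getD i 0
      · rw [if_pos heq, upRun_stop nums i (by push Not; intro _; omega)]
        simp; omega
      · rw [if_neg heq]
        rcases lt_or_gt_of_ne heq with hlt | hgt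
        · have hprod : ¬ (nums.getD (i - 2) 0 - nums.getD (i - 1) 0) *
              (nums.getD (i - 1) 0 - nums.getD i 0) < 0 := by
            have := mul_pos_of_neg_of_neg (a := nums.getD (i - 2) 0 - nums.getD (i - 1) 0)
              (b := nums.getD (i - 1) 0 - nums.getD i 0) (by omega) (by omega)
            omega
          rw [if_neg hprod, upRun_step nums i ⟨hi, hlt⟩]
          have h12 : (i + 1) - 2 = i - 1 := by omega
          exact ih (i + 1) (by omega) (by omega) (by omega) (by rw [h12]; simpa using hlt)
        · have hprod : (nums.getD (i - 2) 0 - nums.getD (i - 1) 0) *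
              (nums.getD (i - 1) 0 - nums.getD i 0) < 0 :=
            mul_neg_of_neg_of_pos (by omega) (by omega)
          rw [if_pos hprod]
          have h4 : (3 : Int) + 1 = 4 := by norm_num
          rw [h4, aGo_ge4 nums (nums.length - (i + 1)) (i + 1) 4 rfl le_rfl,
            upRun_stop nums i (by push Not; intro _; omega)]
          simp; omega

-- phase 2: count = 2, currently decreasing
theorem aGo_phase2 (nums : List Int) (k : Nat) :
    ∀ i, nums.length - i = k → 2 ≤ i → i ≤ nums.length →
    nums.getD (i - 2) 0 > nums.getD (i - 1) 0 →
    aGo nums i 2 =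
      decide (downRun nums i < upRun nums (downRun nums i) ∧
        upRun nums (downRun nums i) = nums.length) := by
  induction k with
  | zero =>
      intro i hk h2 hin hdn
      rw [aGo, if_neg (by omega), downRun_stop nums i (by intro hc; omega),
        upRun_stop nums i (by intro hc; omega)]
      simp
  | succ k ih =>
      intro i hk h2 hin hdn
      have hi : i < nums.length := by omega
      rw [aGo, if_pos hi]
      by_cases heq : nums.getD (i - 1) 0 = nums.getD i 0
      · rw [if_pos heq, downRun_stop nums i (by push Not; intro _; omega),
          upRun_stop nums i (by push Not; intro _; omega)]
        simp
      · rw [if_neg heq]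
        rcases lt_or_gt_of_ne heq with hlt | hgt
        · -- turns up: count becomes 3
          have hprod : (nums.getD (i - 2) 0 - nums.getD (i - 1) 0) *
              (nums.getD (i - 1) 0 - nums.getD i 0) < 0 :=
            mul_neg_of_pos_of_neg (by omega) (by omega)
          rw [if_pos hprod]
          have h3 : (2 : Int) + 1 = 3 := by norm_num
          have h12 : (i + 1) - 2 = i - 1 := by omega
          rw [h3, aGo_phase3 nums (nums.length - (i + 1)) (i + 1) rfl (by omega) (by omega)
              (by rw [h12]; simpa using hlt),
            downRun_stop nums i (by push Not; intro _; omega),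
            upRun_step nums i ⟨hi, hlt⟩]
          have hge := upRun_ge nums (i + 1)
          simp; omega
        · -- still decreasing
          have hprod : ¬ (nums.getD (i - 2) 0 - nums.getD (i - 1) 0) *
              (nums.getD (i - 1) 0 - nums.getD i 0) < 0 := by
            have := mul_pos (a := nums.getD (i - 2) 0 - nums.getD (i - 1) 0)
              (b := nums.getD (i - 1) 0 - nums.getD i 0) (by omega) (by omega)
            omega
          rw [if_neg hprod, downRun_step nums i ⟨hi, hgt⟩]
          have h12 : (i + 1) - 2 = i - 1 := by omega
          exact ih (i + 1) (by omega) (by omega) (by omega) (by rw [h12]; simpa using hgt)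

-- phase 1: count = 1, currently increasing
theorem aGo_phase1 (nums : List Int) (k : Nat) :
    ∀ i, nums.length - i = k → 2 ≤ i → i ≤ nums.length →
    nums.getD (i - 2) 0 < nums.getD (i - 1) 0 →
    aGo nums i 1 =
      decide (upRun nums i < downRun nums (upRun nums i) ∧
        downRun nums (upRun nums i) < upRun nums (downRun nums (upRun nums i)) ∧
        upRun nums (downRun nums (upRun nums i)) = nums.length) := by
  induction k with
  | zero =>
      intro i hk h2 hin hup
      rw [aGo, if_neg (by omega), upRun_stop nums i (by intro hc; omega),
        downRun_stop nums i (by intro hc; omega), upRun_stop nums i (by intro hc; omega)]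
      simp
  | succ k ih =>
      intro i hk h2 hin hup
      have hi : i < nums.length := by omega
      rw [aGo, if_pos hi]
      by_cases heq : nums.getD (i - 1) 0 = nums.getD i 0
      · rw [if_pos heq, upRun_stop nums i (by push Not; intro _; omega),
          downRun_stop nums i (by push Not; intro _; omega),
          upRun_stop nums i (by push Not; intro _; omega)]
        simp
      · rw [if_neg heq]
        rcases lt_or_gt_of_ne heq with hlt | hgt
        · -- still increasing
          have hprod : ¬ (nums.getD (i - 2) 0 - nums.getD (i - 1) 0) *
              (nums.getD (i - 1) 0 - nums.getD i 0) < 0 := by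
            have := mul_pos_of_neg_of_neg (a := nums.getD (i - 2) 0 - nums.getD (i - 1) 0)
              (b := nums.getD (i - 1) 0 - nums.getD i 0) (by omega) (by omega)
            omega
          rw [if_neg hprod, upRun_step nums i ⟨hi, hlt⟩]
          have h12 : (i + 1) - 2 = i - 1 := by omega
          exact ih (i + 1) (by omega) (by omega) (by omega) (by rw [h12]; simpa using hlt)
        · -- turns down: count becomes 2
          have hprod : (nums.getD (i - 2) 0 - nums.getD (i - 1) 0) *
              (nums.getD (i - 1) 0 - nums.getD i 0) < 0 :=
            mul_neg_of_neg_of_pos (by omega) (by omega)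
          rw [if_pos hprod]
          have h2' : (1 : Int) + 1 = 2 := by norm_num
          have h12 : (i + 1) - 2 = i - 1 := by omega
          rw [h2', aGo_phase2 nums (nums.length - (i + 1)) (i + 1) rfl (by omega) (by omega)
              (by rw [h12]; simpa using hgt),
            upRun_stop nums i (by push Not; intro _; omega),
            downRun_step nums i ⟨hi, hgt⟩]
          have hge := downRun_ge nums (i + 1)
          simp; omega

-- ===== VERDICT (by name: the statement is the Claim_ definition above) =====
theorem isTrionic_spec : Claim_equal_isTrionic := by
  intro nums _ hpre
  unfold Spec_isTrionic isTrionic isTrionic_alt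
  by_cases hg : nums.getD 0 0 ≥ nums.getD 1 0
  · rw [if_pos hg, if_pos hg]
  · rw [if_neg hg, if_neg hg]
    have h01 : nums.getD 0 0 < nums.getD 1 0 := by omega
    have hn : 2 ≤ nums.length := hpre
    rw [aGo_phase1 nums (nums.length - 2) 2 rfl le_rfl hn (by simpa using h01)]
    rw [upRun_step nums 1 ⟨by omega, by simpa using h01⟩]
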